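-- pv_equiv track=rewrite | github.com/dllllb/contest-dh-turing | features.py | max_in_row
-- ===== SOURCE A (Python) =====
-- def max_in_row(d):
--     alice, bob = 0, 0
--     max_alice, max_bob = 0, 0
--     if len(d['thread']) > 0:
--         for post in d['thread']:
--             if post['userId'] == 'user1':
--                 max_bob = max(max_bob, bob); bob = 0
--                 alice += 1
--             else:
--                 max_alice = max(max_alice, alice); alice=0
--                 bob += 1
--
--     max_bob = max(max_bob, bob)
--     max_alice = max(max_alice, alice)
--     return max_alice, max_bob
-- ===== SOURCE B (Python) =====
-- def max_in_row(d):
--     # Run-length encode the thread by speaker, then take the longest run per speaker.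
--     runs = []
--     for post in d['thread']:
--         k = post['userId'] == 'user1'
--         if runs and runs[-1][0] == k:
--             runs[-1] = (k, runs[-1][1] + 1)
--         else:
--             runs.append((k, 1))
--     max_alice = max((n for k, n in runs if k), default=0)
--     max_bob = max((n for k, n in runs if not k), default=0)
--     return max_alice, max_bob
-- ===== Notes on version B (the rewrite author's own statement) =====
-- stated objective: alternative
-- what changed: A tracks two reset-on-speaker-change counters plus two running maxima inside one loop; B first run-length-encodes the thread by speaker (extend-last-run-or-append) and then takes the longest run per speaker with max(..., default=0).
import Mathlib
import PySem

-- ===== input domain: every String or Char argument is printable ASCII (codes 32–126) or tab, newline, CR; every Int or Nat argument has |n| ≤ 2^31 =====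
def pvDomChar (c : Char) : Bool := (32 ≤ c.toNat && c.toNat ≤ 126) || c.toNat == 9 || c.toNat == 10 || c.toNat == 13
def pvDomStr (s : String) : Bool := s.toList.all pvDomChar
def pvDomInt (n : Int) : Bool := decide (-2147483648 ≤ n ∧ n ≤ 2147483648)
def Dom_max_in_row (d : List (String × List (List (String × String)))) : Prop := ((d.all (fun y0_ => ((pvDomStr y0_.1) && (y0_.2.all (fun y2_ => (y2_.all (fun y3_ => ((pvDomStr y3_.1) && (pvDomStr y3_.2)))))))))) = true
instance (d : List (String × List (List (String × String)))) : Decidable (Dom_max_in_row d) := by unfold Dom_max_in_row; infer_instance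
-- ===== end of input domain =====

-- B replaces A's four reset-on-change counters by a run-length encoding of the thread
-- followed by a per-speaker maximum (objective: idiomatic/alternative decomposition, same cost).

-- Python dict modelled as an association list: lookup = first match (shared primitive of both ports).
def pvLookup {α : Type} (d : List (String × α)) (k : String) : Option α :=
  (d.find? (fun p => p.1 == k)).map (·.2)

-- ===== PORT A =====
-- A's loop body; state (alice, bob, max_alice, max_bob). post['userId'] is some under Pre_;
-- the .getD "" default is never reached inside Pre_.
def pvStepA (st : Int × Int × Int × Int) (post : List (String × String)) : Int × Int × Int × Int :=
  match st with
  | (alice, bob, ma, mb) =>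
    if (pvLookup post "userId").getD "" == "user1" then
      (alice + 1, 0, ma, max mb bob)
    else
      (0, bob + 1, max ma alice, mb)

def max_in_row (d : List (String × List (List (String × String)))) : Int × Int :=
  -- d['thread']: first-match lookup; none = KeyError, excluded by Pre_ (default [] unreachable there)
  let thread := (pvLookup d "thread").getD []
  let st := if 0 < thread.length then thread.foldl pvStepA (0, 0, 0, 0) else (0, 0, 0, 0)
  (max st.2.2.1 st.1, max st.2.2.2 st.2.1)

-- ===== PORT B =====
-- B's loop body: extend the last run or start a new one (runs[-1] update / append).
def pvStepB (runs : List (Bool × Int)) (post : List (String × String)) : List (Bool × Int) :=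
  let k : Bool := (pvLookup post "userId").getD "" == "user1"
  match runs.getLast? with
  | some (k', n) => if k' == k then runs.dropLast ++ [(k, n + 1)] else runs ++ [(k, 1)]
  | none => [(k, 1)]

def max_in_row_alt (d : List (String × List (List (String × String)))) : Int × Int :=
  let runs := ((pvLookup d "thread").getD []).foldl pvStepB []
  (PySem.List.maxD ((runs.filter (fun r => r.1)).map (·.2)) (fun x => x) 0,
   PySem.List.maxD ((runs.filter (fun r => !r.1)).map (·.2)) (fun x => x) 0)

-- ===== PRECONDITION & SPEC =====
-- Pre_ excludes exactly the KeyError inputs: d must have a 'thread' key and every post a 'userId' key.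
def Pre_max_in_row (d : List (String × List (List (String × String)))) : Prop :=
  (pvLookup d "thread").isSome = true ∧
  ∀ post ∈ ((pvLookup d "thread").getD []), (pvLookup post "userId").isSome = true
instance (d : List (String × List (List (String × String)))) : Decidable (Pre_max_in_row d) := by unfold Pre_max_in_row; infer_instance

def pvWitness_max_in_row : (List (String × List (List (String × String)))) :=
  [("thread", [[("userId", "user1")], [("userId", "user2")], [("userId", "user1")]])]

def Spec_max_in_row (d : List (String × List (List (String × String)))) (out : Int × Int) : Prop := out = max_in_row_alt d
instance (d : List (String × List (List (String × String)))) (out : Int × Int) : Decidable (Spec_max_in_row d out) := by unfold Spec_max_in_row; infer_instance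

-- ===== CLAIM (what is proved, stated in full; the proofs are below) =====
def Claim_equal_max_in_row : Prop := ∀ (d : List (String × List (List (String × String)))), Dom_max_in_row d → Pre_max_in_row d → Spec_max_in_row d (max_in_row d)


-- ===== LEMMAS AND PROOFS =====

-- the two per-speaker maxima of a run list (definitionally the components of max_in_row_alt)
def pvMT (rs : List (Bool × Int)) : Int :=
  PySem.List.maxD ((rs.filter (fun r => r.1)).map (·.2)) (fun x => x) 0
def pvMF (rs : List (Bool × Int)) : Int :=
  PySem.List.maxD ((rs.filter (fun r => !r.1)).map (·.2)) (fun x => x) 0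

lemma pvMaxD_append (xs : List Int) (a : Int) (ha : 0 ≤ a) :
    PySem.List.maxD (xs ++ [a]) (fun x => x) 0 = max (PySem.List.maxD xs (fun x => x) 0) a := by
  cases xs with
  | nil =>
    simp [PySem.List.maxD, PySem.List.max?]
    omega
  | cons x t =>
    simp [PySem.List.maxD, PySem.List.max?_id_cons, List.foldl_append]

lemma pvMT_append_true (rs : List (Bool × Int)) (a : Int) (ha : 0 ≤ a) :
    pvMT (rs ++ [(true, a)]) = max (pvMT rs) a := by
  simp only [pvMT, List.filter_append, List.map_append]
  simp [pvMaxD_append _ _ ha]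

lemma pvMT_append_false (rs : List (Bool × Int)) (b : Int) :
    pvMT (rs ++ [(false, b)]) = pvMT rs := by
  simp [pvMT, List.filter_append]

lemma pvMF_append_false (rs : List (Bool × Int)) (b : Int) (hb : 0 ≤ b) :
    pvMF (rs ++ [(false, b)]) = max (pvMF rs) b := by
  simp only [pvMF, List.filter_append, List.map_append]
  simp [pvMaxD_append _ _ hb]

lemma pvMF_append_true (rs : List (Bool × Int)) (a : Int) :
    pvMF (rs ++ [(true, a)]) = pvMF rs := by
  simp [pvMF, List.filter_append]

-- invariant tying B's run list to A's four counters: either nothing yet, or the last run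
-- is the currently growing streak and the earlier runs carry exactly the recorded maxima
def pvEnc (rs : List (Bool × Int)) (alice bob ma mb : Int) : Prop :=
  (rs = [] ∧ alice = 0 ∧ bob = 0 ∧ ma = 0 ∧ mb = 0) ∨
  (∃ rs', rs = rs' ++ [(true, alice)] ∧ 1 ≤ alice ∧ bob = 0 ∧ 0 ≤ ma ∧ 0 ≤ mb ∧
    pvMT rs' = ma ∧ pvMF rs' = mb) ∨
  (∃ rs', rs = rs' ++ [(false, bob)] ∧ 1 ≤ bob ∧ alice = 0 ∧ 0 ≤ ma ∧ 0 ≤ mb ∧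
    pvMT rs' = ma ∧ pvMF rs' = mb)

lemma pvEnc_step (rs : List (Bool × Int)) (alice bob ma mb : Int)
    (post : List (String × String)) (h : pvEnc rs alice bob ma mb) :
    pvEnc (pvStepB rs post)
      (pvStepA (alice, bob, ma, mb) post).1
      (pvStepA (alice, bob, ma, mb) post).2.1
      (pvStepA (alice, bob, ma, mb) post).2.2.1
      (pvStepA (alice, bob, ma, mb) post).2.2.2 := by
  cases hkc : ((pvLookup post "userId").getD "" == "user1") with
  | true =>
    have hA : pvStepA (alice, bob, ma, mb) post = (alice + 1, 0, ma, max mb bob) := by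
      simp [pvStepA, hkc]
    rw [hA]
    change pvEnc (pvStepB rs post) (alice + 1) 0 ma (max mb bob)
    rcases h with ⟨hrs, ha, hb, hma, hmb⟩ | ⟨rs', hrs, ha, hb, hma0, hmb0, hma, hmb⟩ |
      ⟨rs', hrs, hb, ha, hma0, hmb0, hma, hmb⟩
    · subst hrs ha hb hma hmb
      have hB : pvStepB [] post = [(true, 1)] := by simp [pvStepB, hkc]
      rw [hB]
      exact Or.inr (Or.inl ⟨[], by decide, by decide, rfl, by decide, by decide, by decide,
        by decide⟩)
    · -- same speaker: the last (true) run grows by one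
      subst hrs hb
      have hB : pvStepB (rs' ++ [(true, alice)]) post = rs' ++ [(true, alice + 1)] := by
        simp [pvStepB, hkc]
      rw [hB]
      exact Or.inr (Or.inl ⟨rs', rfl, by omega, rfl, by omega, by omega, hma,
        by rw [hmb]; omega⟩)
    · -- speaker changes: a fresh true-run of length 1 is appended
      subst hrs ha
      have hB : pvStepB (rs' ++ [(false, bob)]) post = (rs' ++ [(false, bob)]) ++ [(true, 1)] := by
        simp [pvStepB, hkc]
      rw [hB]
      refine Or.inr (Or.inl ⟨rs' ++ [(false, bob)], by norm_num, by omega, rfl, by omega,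
        by omega, ?_, ?_⟩)
      · rw [pvMT_append_false, hma]
      · rw [pvMF_append_false _ _ (by omega), hmb]
  | false =>
    have hA : pvStepA (alice, bob, ma, mb) post = (0, bob + 1, max ma alice, mb) := by
      simp [pvStepA, hkc]
    rw [hA]
    change pvEnc (pvStepB rs post) 0 (bob + 1) (max ma alice) mb
    rcases h with ⟨hrs, ha, hb, hma, hmb⟩ | ⟨rs', hrs, ha, hb, hma0, hmb0, hma, hmb⟩ |
      ⟨rs', hrs, hb, ha, hma0, hmb0, hma, hmb⟩
    · subst hrs ha hb hma hmb
      have hB : pvStepB [] post = [(false, 1)] := by simp [pvStepB, hkc]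
      rw [hB]
      exact Or.inr (Or.inr ⟨[], by decide, by decide, rfl, by decide, by decide, by decide,
        by decide⟩)
    · -- speaker changes: a fresh false-run of length 1 is appended
      subst hrs hb
      have hB : pvStepB (rs' ++ [(true, alice)]) post = (rs' ++ [(true, alice)]) ++ [(false, 1)] := by
        simp [pvStepB, hkc]
      rw [hB]
      refine Or.inr (Or.inr ⟨rs' ++ [(true, alice)], by norm_num, by omega, rfl, by omega,
        by omega, ?_, ?_⟩)
      · rw [pvMT_append_true _ _ (by omega), hma]
      · rw [pvMF_append_true, hmb]
    · -- same speaker: the last (false) run grows by one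
      subst hrs ha
      have hB : pvStepB (rs' ++ [(false, bob)]) post = rs' ++ [(false, bob + 1)] := by
        simp [pvStepB, hkc]
      rw [hB]
      exact Or.inr (Or.inr ⟨rs', rfl, by omega, rfl, by omega, by omega,
        by rw [hma]; omega, hmb⟩)

lemma pvEnc_final (rs : List (Bool × Int)) (alice bob ma mb : Int)
    (h : pvEnc rs alice bob ma mb) :
    pvMT rs = max ma alice ∧ pvMF rs = max mb bob := by
  rcases h with ⟨hrs, ha, hb, hma, hmb⟩ | ⟨rs', hrs, ha, hb, hma0, hmb0, hma, hmb⟩ |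
    ⟨rs', hrs, hb, ha, hma0, hmb0, hma, hmb⟩
  · subst hrs ha hb hma hmb
    exact ⟨by decide, by decide⟩
  · subst hrs
    constructor
    · rw [pvMT_append_true _ _ (by omega), hma]
    · rw [pvMF_append_true, hmb]; omega
  · subst hrs
    constructor
    · rw [pvMT_append_false, hma]; omega
    · rw [pvMF_append_false _ _ (by omega), hmb]

lemma pvLoop_eq (posts : List (List (String × String))) :
    ∀ (rs : List (Bool × Int)) (alice bob ma mb : Int), pvEnc rs alice bob ma mb →
      pvEnc (posts.foldl pvStepB rs)
        (posts.foldl pvStepA (alice, bob, ma, mb)).1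
        (posts.foldl pvStepA (alice, bob, ma, mb)).2.1
        (posts.foldl pvStepA (alice, bob, ma, mb)).2.2.1
        (posts.foldl pvStepA (alice, bob, ma, mb)).2.2.2 := by
  induction posts with
  | nil => intro rs alice bob ma mb h; simpa using h
  | cons post rest ih =>
    intro rs alice bob ma mb h
    have h' := pvEnc_step rs alice bob ma mb post h
    simpa [List.foldl_cons] using ih _ _ _ _ _ h'

-- A's 'if len > 0' guard is vacuous: for an empty thread the fold is the initial state anyway
lemma pvA_eq (d : List (String × List (List (String × String)))) :
    max_in_row d =
      (max ((((pvLookup d "thread").getD []).foldl pvStepA (0, 0, 0, 0)).2.2.1)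
           ((((pvLookup d "thread").getD []).foldl pvStepA (0, 0, 0, 0)).1),
       max ((((pvLookup d "thread").getD []).foldl pvStepA (0, 0, 0, 0)).2.2.2)
           ((((pvLookup d "thread").getD []).foldl pvStepA (0, 0, 0, 0)).2.1)) := by
  unfold max_in_row
  cases h : (pvLookup d "thread").getD [] with
  | nil => rfl
  | cons a t => simp

-- ===== VERDICT (by name: the statement is the Claim_ definition above) =====
theorem max_in_row_spec : Claim_equal_max_in_row := by
  intro d _ _
  show max_in_row d = max_in_row_alt d
  have h := pvLoop_eq ((pvLookup d "thread").getD []) [] 0 0 0 0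
    (Or.inl ⟨rfl, rfl, rfl, rfl, rfl⟩)
  have hfin := pvEnc_final _ _ _ _ _ h
  have halt : max_in_row_alt d =
      (pvMT (((pvLookup d "thread").getD []).foldl pvStepB []),
       pvMF (((pvLookup d "thread").getD []).foldl pvStepB [])) := rfl
  rw [pvA_eq, halt, hfin.1, hfin.2]
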